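-- pv_equiv track=rewrite | github.com/alex-toader/st_spinorial_obstruction | tests/42_frobenius_commutator.py | irrep_parities_binary_dihedral
-- ===== SOURCE A (Python) =====
-- def irrep_parities_binary_dihedral(n):
--     """2D_n (order 4n). Character table structure:
--     - 4 one-dimensional irreps (for n ≥ 2)
--     - (n-1) two-dimensional irreps
--     For the 1D irreps: 2 are tensorial (ε=+1), 2 are spinorial (ε=-1).
--     For the 2D irreps at index k (k=1..n-1):
--       ε_χ = χ(-1)/χ(1) = (-1)^k · 2 / 2 = (-1)^k
--     So n_+ from 2D irreps = #{k : k even, 1≤k≤n-1}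
--        n_- from 2D irreps = #{k : k odd, 1≤k≤n-1}
--     """
--     # 1D irreps: χ(a) = ±1 (from conjugation relation bab⁻¹ = a⁻¹).
--     # χ(a) = +1: χ(-1) = 1 (tensorial), χ(b) = ±1. Two tensorial irreps.
--     # χ(a) = -1: χ(-1) = (-1)^n.
--     #   n even: tensorial (χ(b) = ±1). n odd: spinorial (χ(b) = ±i).
--     if n % 2 == 0:
--         n_plus_1d = 4   # all four 1D irreps are tensorial
--         n_minus_1d = 0
--     else:
--         n_plus_1d = 2   # two tensorial + two spinorial
--         n_minus_1d = 2
--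
--     # 2D irreps: χ_k for k = 1, ..., n-1
--     # χ_k(-1) = (-1)^k · 2, so ε_k = (-1)^k
--     n_plus_2d = len([k for k in range(1, n) if k % 2 == 0])
--     n_minus_2d = len([k for k in range(1, n) if k % 2 == 1])
--
--     n_plus = n_plus_1d + n_plus_2d
--     n_minus = n_minus_1d + n_minus_2d
--     total = 4 + (n - 1)
--
--     return {'n_plus': n_plus, 'n_minus': n_minus,
--             'total_irreps': total, 'order': 4*n}
-- ===== SOURCE B (Python) =====
-- def irrep_parities_binary_dihedral(n):
--     # Closed form: among k = 1..n-1 there are (n-1)//2 even k and the rest odd.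
--     m = max(n - 1, 0)
--     even2 = m // 2
--     odd2 = m - even2
--     if n % 2 == 0:
--         n_plus, n_minus = 4 + even2, odd2
--     else:
--         n_plus, n_minus = 2 + even2, 2 + odd2
--     return {'n_plus': n_plus, 'n_minus': n_minus,
--             'total_irreps': 4 + (n - 1), 'order': 4 * n}
-- ===== Notes on version B (the rewrite author's own statement) =====
-- stated objective: faster
-- what changed: Replaces A's two linear-time list comprehensions that count even and odd indices over the range by constant-time closed-form floor-division arithmetic.
import Mathlib
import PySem

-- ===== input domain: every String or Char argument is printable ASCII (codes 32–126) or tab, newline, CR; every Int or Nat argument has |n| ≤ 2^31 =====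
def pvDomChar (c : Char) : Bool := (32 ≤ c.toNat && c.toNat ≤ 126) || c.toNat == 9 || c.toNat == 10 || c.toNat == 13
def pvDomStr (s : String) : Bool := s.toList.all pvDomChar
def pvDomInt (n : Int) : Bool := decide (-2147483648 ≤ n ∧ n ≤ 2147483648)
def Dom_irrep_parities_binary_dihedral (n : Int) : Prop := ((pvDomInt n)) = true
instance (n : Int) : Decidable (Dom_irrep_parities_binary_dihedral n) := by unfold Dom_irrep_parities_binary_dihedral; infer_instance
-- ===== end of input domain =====

-- B replaces A's two O(n) counting comprehensions by the closed forms (n-1)//2 and (n-1)-(n-1)//2 (objective: faster).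

-- ===== PORT A =====
def irrep_parities_binary_dihedral (n : Int) : List (String × Int) :=
  let p1 : Int × Int := if PySem.Int.mod n 2 = 0 then (4, 0) else (2, 2)
  let n_plus_2d : Int :=
    (((PySem.List.pyRange 1 n 1).filter (fun k => PySem.Int.mod k 2 == 0)).length : Int)
  let n_minus_2d : Int :=
    (((PySem.List.pyRange 1 n 1).filter (fun k => PySem.Int.mod k 2 == 1)).length : Int)
  [("n_plus", p1.1 + n_plus_2d), ("n_minus", p1.2 + n_minus_2d),
   ("total_irreps", 4 + (n - 1)), ("order", 4 * n)]

-- ===== PORT B =====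
def irrep_parities_binary_dihedral_alt (n : Int) : List (String × Int) :=
  let m : Int := max (n - 1) 0
  let even2 : Int := PySem.Int.floordiv m 2
  let odd2 : Int := m - even2
  let p : Int × Int := if PySem.Int.mod n 2 = 0 then (4 + even2, odd2) else (2 + even2, 2 + odd2)
  [("n_plus", p.1), ("n_minus", p.2), ("total_irreps", 4 + (n - 1)), ("order", 4 * n)]

-- ===== PRECONDITION & SPEC =====
def Spec_irrep_parities_binary_dihedral (n : Int) (out : List (String × Int)) : Prop := out = irrep_parities_binary_dihedral_alt n
instance (n : Int) (out : List (String × Int)) : Decidable (Spec_irrep_parities_binary_dihedral n out) := by unfold Spec_irrep_parities_binary_dihedral; infer_instance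

-- ===== CLAIM (what is proved, stated in full; the proofs are below) =====
def Claim_equal_irrep_parities_binary_dihedral : Prop := ∀ (n : Int), Dom_irrep_parities_binary_dihedral n → Spec_irrep_parities_binary_dihedral n (irrep_parities_binary_dihedral n)

-- ===== LEMMAS AND PROOFS =====

-- counts of even and odd elements of range(1, 1+m)
theorem pv_counts (m : Nat) :
    ((PySem.List.pyRange 1 (1 + (m : Int)) 1).filter (fun k => PySem.Int.mod k 2 == 0)).length = m / 2 ∧
    ((PySem.List.pyRange 1 (1 + (m : Int)) 1).filter (fun k => PySem.Int.mod k 2 == 1)).length = m - m / 2 := by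
  induction m with
  | zero =>
    rw [PySem.List.pyRange_one_eq_nil (by omega)]
    simp
  | succ m ih =>
    have h : (1 : Int) ≤ 1 + (m : Int) := by omega
    have : (1 : Int) + ((m + 1 : Nat) : Int) = (1 + (m : Int)) + 1 := by push_cast; ring
    rw [this, PySem.List.pyRange_one_succ_right h]
    rcases Nat.even_or_odd (1 + m) with he | ho
    · have h2 : (1 + m) % 2 = 0 := Nat.even_iff.mp he
      have hmv : ((1 : Int) + (m : Int)) % 2 = 0 := by omega
      simp [List.filter_append, hmv] at ih ⊢
      omega
    · have h2 : (1 + m) % 2 = 1 := Nat.odd_iff.mp ho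
      have hmv : ((1 : Int) + (m : Int)) % 2 = 1 := by omega
      simp [List.filter_append, hmv] at ih ⊢
      omega

-- ===== VERDICT (by name: the statement is the Claim_ definition above) =====
theorem irrep_parities_binary_dihedral_spec : Claim_equal_irrep_parities_binary_dihedral := by
  intro n _
  unfold Spec_irrep_parities_binary_dihedral irrep_parities_binary_dihedral irrep_parities_binary_dihedral_alt
  by_cases hn : n ≤ 1
  · have hr : PySem.List.pyRange 1 n 1 = [] := PySem.List.pyRange_one_eq_nil hn
    have hm : max (n - 1) 0 = 0 := by omega
    simp [hr, hm, PySem.Int.floordiv]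
  · push Not at hn
    obtain ⟨m, hmn⟩ : ∃ m : Nat, n = 1 + (m : Int) := ⟨(n - 1).toNat, by omega⟩
    have hc := pv_counts m
    have hmax : max (n - 1) 0 = (m : Int) := by omega
    have hfd : PySem.Int.floordiv (m : Int) 2 = ((m / 2 : Nat) : Int) :=
      PySem.Int.floordiv_natCast m 2
    rw [hmn] at *
    simp only [hmax, hfd, hc.1, hc.2]
    by_cases hp : PySem.Int.mod (1 + (m : Int)) 2 = 0
    · simp only [if_pos hp]
      simp
      omega
    · simp only [if_neg hp]
      simp
      omega
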